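-- pv_equiv track=rewrite | github.com/alwaysday4u/Coding_test | Programmers/Level 2/귤 고르기.py | solution
-- ===== SOURCE A (Python) =====
-- def solution(k, tangerine):
--     tangerine_size=dict()
--     for i in set(tangerine):
--         tangerine_size[i]=0
--     for i in tangerine:
--         tangerine_size[i]+=1
--     result=0
--     for i in sorted(tangerine_size.values(),reverse=True):
--         k-=i
--         result+=1
--         if k<=0:
--             break
--     return result
-- ===== SOURCE B (Python) =====
-- def solution(k, tangerine):
--     counts = {}
--     for t in tangerine:
--         counts[t] = counts.get(t, 0) + 1
--     n = len(tangerine)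
--     buckets = [0] * (n + 1)
--     for c in counts.values():
--         buckets[c] += 1
--     result = 0
--     for c in range(n, 0, -1):
--         for _ in range(buckets[c]):
--             k -= c
--             result += 1
--             if k <= 0:
--                 return result
--     return result
-- ===== Notes on version B (the rewrite author's own statement) =====
-- stated objective: alternative
-- what changed: B replaces A's zero-initialised dict plus comparison sort of the frequency values with a single-pass counter and a counting-sort bucket array over frequency values (bounded by n), consumed from the largest frequency down.
import Mathlib
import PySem

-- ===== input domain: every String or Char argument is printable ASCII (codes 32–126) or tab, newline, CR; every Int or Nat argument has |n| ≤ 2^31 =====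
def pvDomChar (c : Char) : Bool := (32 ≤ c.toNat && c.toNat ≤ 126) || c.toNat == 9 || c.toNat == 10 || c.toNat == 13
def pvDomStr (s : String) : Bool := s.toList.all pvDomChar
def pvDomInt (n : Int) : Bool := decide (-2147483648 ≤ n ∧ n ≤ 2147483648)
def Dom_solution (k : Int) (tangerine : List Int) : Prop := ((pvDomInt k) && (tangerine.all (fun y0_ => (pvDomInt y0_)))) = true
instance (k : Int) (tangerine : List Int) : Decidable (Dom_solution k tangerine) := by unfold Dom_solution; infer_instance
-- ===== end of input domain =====

-- B replaces the comparison sort of the frequency values by a counting-sort bucket array (frequencies are bounded by n); same greedy consumption.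

-- ===== PORT A =====
-- 'for i in sorted(...): k-=i; result+=1; if k<=0: break'
def loopA : List Int → Int → Int → Int
  | [], _, result => result
  | i :: rest, k, result =>
      if k - i ≤ 0 then result + 1 else loopA rest (k - i) (result + 1)

def solution (k : Int) (tangerine : List Int) : Int :=
  -- for i in set(tangerine): tangerine_size[i] = 0   (dict built over the set; only its sorted values are used, so set order cannot matter)
  let d1 := (PySem.Set.ofList tangerine).foldl (fun d i => d.insert i (0 : Int)) PySem.Dict.empty
  -- for i in tangerine: tangerine_size[i] += 1   (key i is always present, so modify's default 0 is never consulted — exact)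
  let d2 := tangerine.foldl (fun d i => d.modify i 0 (· + 1)) d1
  loopA (PySem.List.sorted d2.values (fun x => x) true) k 0

-- ===== PORT B =====
-- 'for _ in range(buckets[c]): k-=c; result+=1; if k<=0: return result' — third component signals the early return
def bInner (c : Int) : Nat → Int → Int → Int × Int × Bool
  | 0, k, result => (k, result, false)
  | m + 1, k, result =>
      if k - c ≤ 0 then (k - c, result + 1, true) else bInner c m (k - c) (result + 1)

-- 'for c in range(n, 0, -1)' — Nat countdown, current c is (c+1)
def bOuter (buckets : List Int) : Nat → Int → Int → Int
  | 0, _, result => result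
  | c + 1, k, result =>
      let t := bInner ((c : Int) + 1) (PySem.List.pyGetD buckets ((c : Int) + 1) 0).toNat k result
      if t.2.2 then t.2.1 else bOuter buckets c t.1 t.2.1

def solution_alt (k : Int) (tangerine : List Int) : Int :=
  -- counts[t] = counts.get(t, 0) + 1
  let counts := tangerine.foldl (fun d t => d.insert t (d.getD t 0 + 1)) PySem.Dict.empty
  let n := tangerine.length
  -- buckets[c] += 1 ; each c is a frequency, 1 ≤ c ≤ n, so the index is always in range — pySetD/pyGetD are exact here
  let buckets := counts.values.foldl
    (fun b c => PySem.List.pySetD b c (PySem.List.pyGetD b c 0 + 1))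
    (List.replicate (n + 1) (0 : Int))
  bOuter buckets n k 0

-- ===== PRECONDITION & SPEC =====
def Spec_solution (k : Int) (tangerine : List Int) (out : Int) : Prop := out = solution_alt k tangerine
instance (k : Int) (tangerine : List Int) (out : Int) : Decidable (Spec_solution k tangerine out) := by unfold Spec_solution; infer_instance

-- ===== CLAIM (what is proved, stated in full; the proofs are below) =====
def Claim_equal_solution : Prop := ∀ (k : Int) (tangerine : List Int), Dom_solution k tangerine → Spec_solution k tangerine (solution k tangerine)

-- ===== LEMMAS AND PROOFS =====

-- the common frequency-value list: counts of the distinct elements in first-occurrence order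
def Vfreq (xs : List Int) : List Int :=
  (PySem.Set.ofList xs).map (fun kk => ((xs.count kk : Nat) : Int))

-- descending expansion of the bucket array: for c = n,…,1 emit buckets[c] copies of c
def expandB (bu : List Int) : Nat → List Int
  | 0 => []
  | c + 1 =>
      List.replicate (PySem.List.pyGetD bu ((c : Int) + 1) 0).toNat ((c : Int) + 1) ++ expandB bu c

-- zero-initialisation: every lookup in the phase-1 dict is 0
theorem getD_zero_init (l : List Int) (d : PySem.Dict Int Int) (v : Int)
    (h : d.getD v 0 = 0) :
    (l.foldl (fun d i => d.insert i (0 : Int)) d).getD v 0 = 0 := by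
  induction l generalizing d with
  | nil => simpa using h
  | cons x l ih =>
      simp only [List.foldl_cons]
      exact ih _ (by rw [PySem.Dict.getD_insert]; split <;> simp [h])

theorem update_of_subset (l s : List Int) (h : ∀ x ∈ l, x ∈ s) :
    PySem.Set.update s l = s := by
  induction l generalizing s with
  | nil => simp [PySem.Set.update_nil]
  | cons x l ih =>
      rw [PySem.Set.update_cons, PySem.Set.add_of_mem (h x (by simp))]
      exact ih s (fun y hy => h y (by simp [hy]))

-- A's dict after both loops: keys = set(tangerine), value at v = count of v
theorem d2_keys (xs : List Int) :
    ((xs.foldl (fun d i => d.modify i 0 (· + 1))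
      ((PySem.Set.ofList xs).foldl (fun d i => d.insert i (0 : Int)) PySem.Dict.empty)).keys)
      = PySem.Set.ofList xs := by
  rw [PySem.Dict.keys_foldl_modify xs 0 (fun _ _ v => v + 1),
      PySem.Dict.keys_foldl_insert (PySem.Set.ofList xs) (fun _ _ => (0 : Int))]
  rw [PySem.Dict.keys_empty, PySem.Set.update_nil_left, PySem.Set.ofList_ofList]
  exact update_of_subset _ _ (fun x hx => (PySem.Set.mem_ofList xs x).mpr hx)

theorem d2_getD (xs : List Int) (v : Int) :
    ((xs.foldl (fun d i => d.modify i 0 (· + 1))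
      ((PySem.Set.ofList xs).foldl (fun d i => d.insert i (0 : Int)) PySem.Dict.empty)).getD v 0)
      = (xs.count v : Int) := by
  rw [PySem.Dict.getD_foldl_modify_add_one,
      getD_zero_init _ _ _ (by simp [PySem.Dict.getD_empty])]
  simp

theorem valsA_eq (xs : List Int) :
    ((xs.foldl (fun d i => d.modify i 0 (· + 1))
      ((PySem.Set.ofList xs).foldl (fun d i => d.insert i (0 : Int)) PySem.Dict.empty)).values)
      = Vfreq xs := by
  rw [PySem.Dict.values_eq_map_keys _ (by rw [d2_keys]; exact PySem.Set.nodup_ofList xs) 0,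
      d2_keys]
  unfold Vfreq
  exact List.map_congr_left (fun kk _ => d2_getD xs kk)

theorem valsB_eq (xs : List Int) :
    ((xs.foldl (fun d t => d.insert t (d.getD t 0 + 1)) PySem.Dict.empty).values) = Vfreq xs := by
  rw [PySem.Dict.foldl_insert_getD_add_one_eq_counter]
  rw [PySem.Dict.values_eq_map_keys _ (PySem.Dict.nodup_keys_counter xs) 0,
      PySem.Dict.keys_counter]
  unfold Vfreq
  exact List.map_congr_left (fun kk _ => PySem.Dict.getD_counter xs kk)

theorem mem_Vfreq (xs : List Int) (v : Int) (hv : v ∈ Vfreq xs) :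
    ∃ m : Nat, v = (m : Int) ∧ 1 ≤ m ∧ m ≤ xs.length := by
  unfold Vfreq at hv
  obtain ⟨kk, hk, rfl⟩ := List.mem_map.mp hv
  refine ⟨xs.count kk, rfl, ?_, List.count_le_length⟩
  have hmem : kk ∈ xs := (PySem.Set.mem_ofList xs kk).mp hk
  have := List.count_pos_iff.mpr hmem
  omega

-- counting-sort bucket invariant
theorem bucket_getD (n : Nat) (l b : List Int)
    (hl : ∀ v ∈ l, ∃ m : Nat, v = (m : Int) ∧ 1 ≤ m ∧ m ≤ n)
    (hb : b.length = n + 1) (j : Nat) :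
    PySem.List.pyGetD (l.foldl (fun b c => PySem.List.pySetD b c (PySem.List.pyGetD b c 0 + 1)) b) (j : Int) 0
      = PySem.List.pyGetD b (j : Int) 0 + (l.count (j : Int) : Int) := by
  induction l generalizing b with
  | nil => simp
  | cons x l ih =>
      obtain ⟨m, rfl, hm1, hmn⟩ := hl x (by simp)
      simp only [List.foldl_cons]
      rw [ih _ (fun v hv => hl v (List.mem_cons_of_mem _ hv))
            (by simp [hb])]
      rw [PySem.List.pyGetD_pySetD_natCast _ _ _ _ _ (by omega)]
      by_cases hjm : j = m
      · subst hjm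
        simp
        ring
      · have hne : ((j : Int) ≠ (m : Int)) := by exact_mod_cast hjm
        simp [List.count_cons]
        omega

-- inner loop simulation: bInner consumes a replicate block of the expanded list
theorem inner_sim (m : Nat) (c k r : Int) (rest : List Int) :
    loopA (List.replicate m c ++ rest) k r
      = (if (bInner c m k r).2.2 then (bInner c m k r).2.1
         else loopA rest (bInner c m k r).1 (bInner c m k r).2.1) := by
  induction m generalizing k r with
  | zero => simp [bInner]
  | succ m ih =>
      simp only [List.replicate_succ, List.cons_append, loopA, bInner]
      by_cases h : k - c ≤ 0
      · simp [h]
      · simp only [if_neg h]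
        exact ih (k - c) (r + 1)

-- outer loop simulation: bOuter over the buckets = loopA over the expanded list
theorem outer_sim (bu : List Int) (c : Nat) (k r : Int) :
    bOuter bu c k r = loopA (expandB bu c) k r := by
  induction c generalizing k r with
  | zero => simp [bOuter, expandB, loopA]
  | succ c ih =>
      rw [bOuter, expandB, inner_sim]
      split
      · rfl
      · exact ih _ _

-- elements and order of the expanded list
theorem expandB_mem_pairwise (bu : List Int) (c : Nat) :
    (∀ v ∈ expandB bu c, 1 ≤ v ∧ v ≤ (c : Int)) ∧
      (expandB bu c).Pairwise (fun a b => b ≤ a) := by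
  induction c with
  | zero => simp [expandB]
  | succ c ih =>
      obtain ⟨ihmem, ihpw⟩ := ih
      constructor
      · intro v hv
        rw [expandB] at hv
        rcases List.mem_append.mp hv with h | h
        · have hv' := List.eq_of_mem_replicate h
          subst hv'
          constructor <;> push_cast <;> omega
        · obtain ⟨h1, h2⟩ := ihmem v h
          constructor <;> push_cast <;> omega
      · rw [expandB, List.pairwise_append]
        refine ⟨List.pairwise_replicate.mpr (Or.inr le_rfl), ihpw, ?_⟩
        intro a ha b hb
        rw [List.eq_of_mem_replicate ha]
        have := (ihmem b hb).2
        omega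

-- count of a value in the expanded list (for in-range values)
theorem expandB_count (bu : List Int) (c : Nat) (j : Nat) :
    1 ≤ j → j ≤ c →
    (expandB bu c).count ((j : Nat) : Int) = (PySem.List.pyGetD bu (j : Int) 0).toNat := by
  induction c with
  | zero => intro h1 h2; omega
  | succ c ih =>
      intro h1 h2
      rw [expandB, List.count_append, List.count_replicate]
      simp only [beq_iff_eq]
      by_cases hjm : j = c + 1
      · subst hjm
        have h0 : (expandB bu c).count ((c + 1 : Nat) : Int) = 0 := by
          rw [List.count_eq_zero]
          intro hmem
          have h := (expandB_mem_pairwise bu c).1 _ hmem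
          omega
        have hcast : ((c : Int) + 1) = ((c + 1 : Nat) : Int) := by push_cast; ring
        rw [h0, if_pos hcast, Nat.add_zero, hcast]
      · rw [if_neg (by omega), Nat.zero_add]
        exact ih h1 (by omega)

-- bucket lookups on the built array give the counts of the frequency list
theorem bucketsOf_getD (xs : List Int) (j : Nat) :
    PySem.List.pyGetD
      ((Vfreq xs).foldl (fun b c => PySem.List.pySetD b c (PySem.List.pyGetD b c 0 + 1))
        (List.replicate (xs.length + 1) (0 : Int))) (j : Int) 0
      = ((Vfreq xs).count (j : Int) : Int) := by
  rw [bucket_getD xs.length _ _ (mem_Vfreq xs) (by simp) j]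
  rw [PySem.List.pyGetD_natCast]
  simp [List.getD_eq_getElem?_getD]

-- the descending counting-sort expansion IS sorted(values, reverse=True)
theorem sorted_eq_expand (xs : List Int) :
    PySem.List.sorted (Vfreq xs) (fun x => x) true
      = expandB ((Vfreq xs).foldl (fun b c => PySem.List.pySetD b c (PySem.List.pyGetD b c 0 + 1))
          (List.replicate (xs.length + 1) (0 : Int))) xs.length := by
  have hperm : (Vfreq xs).Perm
      (expandB ((Vfreq xs).foldl (fun b c => PySem.List.pySetD b c (PySem.List.pyGetD b c 0 + 1))
        (List.replicate (xs.length + 1) (0 : Int))) xs.length) := by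
    rw [List.perm_iff_count]
    intro a
    by_cases ha : 1 ≤ a ∧ a ≤ (xs.length : Int)
    · obtain ⟨ha1, ha2⟩ := ha
      have haj : a = ((a.toNat : Nat) : Int) := by omega
      rw [haj, expandB_count _ _ _ (by omega) (by omega), bucketsOf_getD xs a.toNat]
      simp
    · rw [List.count_eq_zero.mpr, List.count_eq_zero.mpr]
      · intro hmem
        have h := (expandB_mem_pairwise _ xs.length).1 _ hmem
        omega
      · intro hmem
        obtain ⟨m, rfl, hm1, hmn⟩ := mem_Vfreq xs a hmem
        omega
  exact List.Perm.eq_of_pairwise (fun a b _ _ h1 h2 => by omega)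
    (PySem.List.sorted_pairwise_rev (Vfreq xs) (fun x => x))
    (expandB_mem_pairwise _ xs.length).2
    ((PySem.List.sorted_perm (Vfreq xs) (fun x => x) true).trans hperm)

theorem solution_spec : Claim_equal_solution := by
  intro k xs _
  show solution k xs = solution_alt k xs
  simp only [solution, solution_alt, valsA_eq, valsB_eq]
  rw [outer_sim, sorted_eq_expand]

-- ===== VERDICT (by name: the statement is the Claim_ definition above) =====
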